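-- pv_equiv track=rewrite | github.com/arroyo235/2023 | day3/day3.py | is_adjacent
-- ===== SOURCE A (Python) =====
-- def is_adjacent(num_coord, symbols_coords):
--     x, y = num_coord
--     adjacents = [(x-1, y-1), (x, y-1), (x+1, y-1),
--                  (x-1, y),             (x+1, y),
--                  (x-1, y+1), (x, y+1), (x+1, y+1)]
--
--     for adj in adjacents:
--         if adj in symbols_coords:
--             return True
--
--     return False
-- ===== SOURCE B (Python) =====
-- def is_adjacent(num_coord, symbols_coords):
--     x, y = num_coord
--     for sx, sy in symbols_coords:
--         if abs(sx - x) <= 1 and abs(sy - y) <= 1 and (sx, sy) != (x, y):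
--             return True
--     return False
-- ===== Notes on version B (the rewrite author's own statement) =====
-- stated objective: idiomatic
-- what changed: B scans the symbol list once with a Chebyshev-distance test (abs(sx-x)<=1 and abs(sy-y)<=1, excluding the centre) instead of materialising the 8 neighbour cells and probing each against the container.
import Mathlib
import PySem

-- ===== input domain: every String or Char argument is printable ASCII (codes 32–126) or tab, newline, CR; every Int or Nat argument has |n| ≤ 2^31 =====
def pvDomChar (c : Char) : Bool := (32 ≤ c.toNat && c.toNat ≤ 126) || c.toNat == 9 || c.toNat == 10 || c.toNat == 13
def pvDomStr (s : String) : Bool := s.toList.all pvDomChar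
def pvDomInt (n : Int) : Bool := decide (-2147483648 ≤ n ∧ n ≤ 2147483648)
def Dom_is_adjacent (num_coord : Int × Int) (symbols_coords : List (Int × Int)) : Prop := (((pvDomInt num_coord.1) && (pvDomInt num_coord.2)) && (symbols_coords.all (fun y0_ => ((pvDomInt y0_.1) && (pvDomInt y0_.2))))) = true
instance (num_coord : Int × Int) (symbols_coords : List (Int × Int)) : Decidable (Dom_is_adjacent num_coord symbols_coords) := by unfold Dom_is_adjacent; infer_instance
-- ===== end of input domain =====

-- B scans the symbols once with a Chebyshev-distance test instead of probing 8 neighbour cells; same cost, more idiomatic.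
-- ===== PORT A =====
def is_adjacent (num_coord : Int × Int) (symbols_coords : List (Int × Int)) : Bool :=
  let x := num_coord.1
  let y := num_coord.2
  let adjacents : List (Int × Int) :=
    [(x-1, y-1), (x, y-1), (x+1, y-1),
     (x-1, y),             (x+1, y),
     (x-1, y+1), (x, y+1), (x+1, y+1)]
  adjacents.any (fun adj => symbols_coords.contains adj)

-- ===== PORT B =====
def is_adjacent_alt (num_coord : Int × Int) (symbols_coords : List (Int × Int)) : Bool :=
  symbols_coords.any (fun s =>
    decide (|s.1 - num_coord.1| ≤ 1) && decide (|s.2 - num_coord.2| ≤ 1) && !(s == num_coord))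

-- ===== PRECONDITION & SPEC =====
def Spec_is_adjacent (num_coord : Int × Int) (symbols_coords : List (Int × Int)) (out : Bool) : Prop := out = is_adjacent_alt num_coord symbols_coords
instance (num_coord : Int × Int) (symbols_coords : List (Int × Int)) (out : Bool) : Decidable (Spec_is_adjacent num_coord symbols_coords out) := by unfold Spec_is_adjacent; infer_instance

-- ===== CLAIM (what is proved, stated in full; the proofs are below) =====
def Claim_equal_is_adjacent : Prop := ∀ (num_coord : Int × Int) (symbols_coords : List (Int × Int)), Dom_is_adjacent num_coord symbols_coords → Spec_is_adjacent num_coord symbols_coords (is_adjacent num_coord symbols_coords)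

-- ===== LEMMAS AND PROOFS =====

-- ===== VERDICT (by name: the statement is the Claim_ definition above) =====
theorem is_adjacent_spec : Claim_equal_is_adjacent := by
  intro nc sc _
  obtain ⟨x, y⟩ := nc
  unfold Spec_is_adjacent
  rw [Bool.eq_iff_iff]
  simp only [is_adjacent, is_adjacent_alt, List.any_eq_true, List.contains_iff_mem,
    List.mem_cons, List.not_mem_nil, or_false, Bool.and_eq_true, decide_eq_true_eq,
    Bool.not_eq_true', beq_eq_false_iff_ne, ne_eq, abs_le]
  constructor
  · rintro ⟨adj, h8, hmem⟩
    refine ⟨adj, hmem, ?_⟩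
    rcases h8 with h|h|h|h|h|h|h|h <;> subst h <;> simp only [Prod.mk.injEq] <;> omega
  · rintro ⟨s, hmem, h⟩
    obtain ⟨sx, sy⟩ := s
    refine ⟨(sx, sy), ?_, hmem⟩
    simp only [Prod.mk.injEq] at h ⊢
    omega
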